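-- pv_equiv track=rewrite | github.com/WXW322/backend | Reverse_Tool/common/Converter/MessageConvert.py | clsMessagesByRegix
-- ===== SOURCE A (Python) =====
-- def clsMessagesByRegix(regixS, wLen, messages):
--     splitDatas = {}
--     for message in messages:
--         rightData = str(message[0:wLen])
--         lo = False
--         for regix in regixS:
--             if regix in rightData:
--                 if regix not in splitDatas:
--                     splitDatas[regix] = []
--                 splitDatas[regix].append(message)
--                 lo = True
--         if not lo:
--             if 'unkown' not in splitDatas:
--                 splitDatas['unkown'] = []
--             splitDatas['unkown'].append(message)
--     return splitDatas
-- ===== SOURCE B (Python) =====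
-- def clsMessagesByRegix(regixS, wLen, messages):
--     # Tag each message once with its list of matching patterns (or ['unkown']),
--     # derive the key order, then gather each group with a per-key pass.
--     def tag(m):
--         p = m[0:wLen]
--         ks = [r for r in regixS if r in p]
--         return (m, ks if ks else ['unkown'])
--     tagged = [tag(m) for m in messages]
--     order = []
--     for _, ks in tagged:
--         for k in ks:
--             if k not in order:
--                 order.append(k)
--     return {k: [m for m, ks in tagged for k2 in ks if k2 == k] for k in order}
-- ===== Notes on version B (the rewrite author's own statement) =====
-- stated objective: alternative
-- what changed: B replaces A's single-pass dict mutation with a matched flag by a tag-then-gather decomposition: each message is tagged once with its matched patterns (or ['unkown']), the key order is derived from the tags, and each group is gathered in a per-key pass.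
import Mathlib
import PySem

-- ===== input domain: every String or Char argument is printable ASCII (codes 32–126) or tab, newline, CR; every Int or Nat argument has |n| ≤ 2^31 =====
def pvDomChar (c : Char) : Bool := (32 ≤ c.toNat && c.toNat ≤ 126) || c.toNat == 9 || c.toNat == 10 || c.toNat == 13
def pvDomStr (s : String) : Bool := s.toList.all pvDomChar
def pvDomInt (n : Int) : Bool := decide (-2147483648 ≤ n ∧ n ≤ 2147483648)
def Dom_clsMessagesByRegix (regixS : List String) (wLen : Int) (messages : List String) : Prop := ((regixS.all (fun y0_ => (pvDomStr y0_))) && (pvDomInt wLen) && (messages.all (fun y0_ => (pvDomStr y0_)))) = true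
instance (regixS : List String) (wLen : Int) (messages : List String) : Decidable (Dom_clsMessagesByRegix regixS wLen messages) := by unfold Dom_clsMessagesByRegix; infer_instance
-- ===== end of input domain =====

-- B tags every message once with its list of matched patterns and then gathers each
-- group in a per-key pass, instead of A's one-pass dict mutation with a matched flag
-- (objective: alternative decomposition, same asymptotic cost).

-- ===== PORT A =====
-- splitDatas[regix] = [] if absent, then splitDatas[regix].append(message)
def pvInsA (sd : PySem.Dict String (List String)) (k m : String) : PySem.Dict String (List String) :=
  let sd1 := if sd.contains k then sd else sd.insert k []
  sd1.insert k (sd1.getD k [] ++ [m])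

def clsMessagesByRegix (regixS : List String) (wLen : Int) (messages : List String) : List (String × List String) :=
  (messages.foldl (fun splitDatas message =>
      let rightData := PySem.Str.slice message (some 0) (some wLen)
      let p := regixS.foldl (fun p regix =>
          if PySem.Str.isIn regix rightData then (pvInsA p.1 regix message, true) else p)
        (splitDatas, false)
      if p.2 then p.1 else pvInsA p.1 "unkown" message)
    PySem.Dict.empty).items

-- ===== PORT B =====
-- (m, [r for r in regixS if r in p] or ['unkown'])  with p = m[0:wLen]
def pvTag (regixS : List String) (wLen : Int) (m : String) : String × List String :=
  let p := PySem.Str.slice m (some 0) (some wLen)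
  let ks := regixS.filter (fun r => PySem.Str.isIn r p)
  (m, if ks.isEmpty then ["unkown"] else ks)

def clsMessagesByRegix_alt (regixS : List String) (wLen : Int) (messages : List String) : List (String × List String) :=
  let tagged := messages.map (pvTag regixS wLen)
  let order := tagged.foldl (fun ord t =>
      t.2.foldl (fun ord k => if ord.contains k then ord else ord ++ [k]) ord) []
  order.map (fun k => (k, tagged.flatMap (fun t => (t.2.filter (fun k2 => k2 == k)).map (fun _ => t.1))))

-- ===== PRECONDITION & SPEC =====
def Spec_clsMessagesByRegix (regixS : List String) (wLen : Int) (messages : List String) (out : List (String × List String)) : Prop := out = clsMessagesByRegix_alt regixS wLen messages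
instance (regixS : List String) (wLen : Int) (messages : List String) (out : List (String × List String)) : Decidable (Spec_clsMessagesByRegix regixS wLen messages out) := by unfold Spec_clsMessagesByRegix; infer_instance

-- ===== CLAIM (what is proved, stated in full; the proofs are below) =====
def Claim_equal_clsMessagesByRegix : Prop := ∀ (regixS : List String) (wLen : Int) (messages : List String), Dom_clsMessagesByRegix regixS wLen messages → Spec_clsMessagesByRegix regixS wLen messages (clsMessagesByRegix regixS wLen messages)

-- ===== LEMMAS AND PROOFS =====

-- the (key, message) pair stream that A's dict loop effectively processes, one pair per append
def pvPairs (regixS : List String) (wLen : Int) (messages : List String) : List (String × String) :=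
  (messages.map (pvTag regixS wLen)).flatMap (fun t => t.2.map (fun k => (k, t.1)))

theorem pvInsA_eq_modify (d : PySem.Dict String (List String)) (k m : String) :
    pvInsA d k m = d.modify k [] (· ++ [m]) := by
  unfold pvInsA
  by_cases h : d.contains k = true
  · simp only [h, if_true]; rfl
  · simp only [Bool.not_eq_true] at h
    have hif : (if d.contains k = true then d else d.insert k ([] : List String)) = d.insert k [] := by
      simp [h]
    rw [hif]
    show (d.insert k ([] : List String)).insert k ((d.insert k ([] : List String)).getD k [] ++ [m]) = _
    rw [PySem.Dict.getD_insert_self d k [] []]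
    have hk : k ∉ d.keys := by
      rw [PySem.Dict.contains_eq_decide_mem_keys] at h
      simpa using h
    have hm : d.modify k [] (· ++ [m]) = d.insert k (d.getD k [] ++ [m]) := rfl
    rw [hm, PySem.Dict.getD_of_not_contains d [] h]
    apply PySem.Dict.ext
    have h1 : (d.insert k ([] : List String)).contains k = true :=
      PySem.Dict.contains_insert_self d k []
    rw [PySem.Dict.items_insert_of_contains _ _ h1,
        PySem.Dict.items_insert_of_not_contains _ _ h,
        PySem.Dict.items_insert_of_not_contains _ _ h, List.map_append]
    have hid : d.items.map (fun p => if p.1 == k then (k, [] ++ [m]) else p) = d.items.map id := by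
      apply List.map_congr_left
      intro p hp
      have hne : p.1 ≠ k := fun hpk => hk (hpk ▸ List.mem_map_of_mem hp)
      simp [hne]
    rw [hid, List.map_id]
    simp

-- the inner for-regix loop is a fold of appends over the matched patterns, plus the flag
theorem pvInner (rs : List String) (cond : String → Bool) (m : String) :
    ∀ (sd : PySem.Dict String (List String)) (lo : Bool),
    rs.foldl (fun p r => if cond r then (pvInsA p.1 r m, true) else p) (sd, lo)
      = ((rs.filter cond).foldl (fun d k => pvInsA d k m) sd,
         lo || !(rs.filter cond).isEmpty) := by
  induction rs with
  | nil => intro sd lo; simp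
  | cons r rs ih =>
    intro sd lo
    by_cases h : cond r = true
    · simp [h, ih]
    · simp only [Bool.not_eq_true] at h
      simp [h, ih]

-- one message of A's loop = a fold of appends over that message's tag keys
theorem pvBody (regixS : List String) (wLen : Int) (sd : PySem.Dict String (List String)) (m : String) :
    (let rightData := PySem.Str.slice m (some 0) (some wLen)
     let p := regixS.foldl (fun p regix =>
         if PySem.Str.isIn regix rightData then (pvInsA p.1 regix m, true) else p)
       (sd, false)
     if p.2 then p.1 else pvInsA p.1 "unkown" m)
    = (pvTag regixS wLen m).2.foldl (fun d k => pvInsA d k m) sd := by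
  simp only [pvInner, pvTag, Bool.false_or]
  generalize (List.filter (fun r => PySem.Str.isIn r (PySem.Str.slice m (some 0) (some wLen))) regixS) = F
  by_cases h : F = []
  · subst h; simp
  · have hE : F.isEmpty = false := by simp [h]
    simp [hE]

-- A's dict is the modify-append fold over the pair stream
theorem pvDictAux (regixS : List String) (wLen : Int) (messages : List String) :
    ∀ d : PySem.Dict String (List String),
    (messages.foldl (fun splitDatas message =>
        let rightData := PySem.Str.slice message (some 0) (some wLen)
        let p := regixS.foldl (fun p regix =>
            if PySem.Str.isIn regix rightData then (pvInsA p.1 regix message, true) else p)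
          (splitDatas, false)
        if p.2 then p.1 else pvInsA p.1 "unkown" message)
      d)
    = (pvPairs regixS wLen messages).foldl (fun d q => d.modify q.1 [] (· ++ [q.2])) d := by
  induction messages with
  | nil => intro d; simp [pvPairs]
  | cons m ms ih =>
    intro d
    rw [List.foldl_cons, pvBody, ih]
    show _ = ((pvTag regixS wLen m).2.map (fun k => (k, m)) ++ pvPairs regixS wLen ms).foldl _ d
    rw [List.foldl_append, List.foldl_map]
    congr 1
    have : ∀ (ks : List String) (d : PySem.Dict String (List String)),
        ks.foldl (fun d k => pvInsA d k m) d
          = ks.foldl (fun d k => d.modify k [] (· ++ [m])) d := by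
      intro ks
      induction ks with
      | nil => intro d; rfl
      | cons k ks ih2 => intro d; rw [List.foldl_cons, List.foldl_cons, pvInsA_eq_modify, ih2]
    exact this _ d

-- pushing Set.update through flatMap
theorem pvUpdate_flatMap {β : Type} (f : β → List String) (l : List β) :
    ∀ s : PySem.Set String, PySem.Set.update s (l.flatMap f) = l.foldl (fun s t => PySem.Set.update s (f t)) s := by
  induction l with
  | nil => intro s; rfl
  | cons t l ih => intro s; rw [List.flatMap_cons, PySem.Set.update_append, List.foldl_cons, ih]

-- a dict with Nodup keys is exactly its keys paired with their getD values
theorem pvItems_eq (d : PySem.Dict String (List String)) (h : d.keys.Nodup) :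
    d.items = d.keys.map (fun k => (k, d.getD k [])) := by
  conv_lhs => rw [← List.map_id d.items]
  show _ = (d.items.map (·.1)).map (fun k => (k, d.getD k []))
  rw [List.map_map]
  apply List.map_congr_left
  intro p hp
  have := PySem.Dict.getD_of_mem_items d (k := p.1) (v := p.2) (by simpa using hp) h []
  simp [this]

-- the pair-stream values at a key are B's per-key gather
theorem pvGather (tagged : List (String × List String)) (k : String) :
    ((tagged.flatMap (fun t => t.2.map (fun k' => (k', t.1)))).filter (fun q => q.1 == k)).map (·.2)
      = tagged.flatMap (fun t => (t.2.filter (fun k2 => k2 == k)).map (fun _ => t.1)) := by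
  induction tagged with
  | nil => rfl
  | cons t ts ih =>
    rw [List.flatMap_cons, List.flatMap_cons, List.filter_append, List.map_append, ih]
    congr 1
    rw [List.filter_map, List.map_map]
    simp [Function.comp_def]

theorem clsMessagesByRegix_eq : ∀ (regixS : List String) (wLen : Int) (messages : List String),
    clsMessagesByRegix regixS wLen messages = clsMessagesByRegix_alt regixS wLen messages := by
  intro regixS wLen messages
  unfold clsMessagesByRegix clsMessagesByRegix_alt
  rw [pvDictAux]
  have hkeys : ((pvPairs regixS wLen messages).foldl
      (fun d q => d.modify q.1 [] (· ++ [q.2])) PySem.Dict.empty).keys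
      = PySem.Set.update ([] : PySem.Set String) ((pvPairs regixS wLen messages).map Prod.fst) := by
    exact PySem.Dict.keys_foldl_modify_key (pvPairs regixS wLen messages) Prod.fst []
      (fun _ q v => v ++ [q.2]) PySem.Dict.empty
  have hnodup : ((pvPairs regixS wLen messages).foldl
      (fun d q => d.modify q.1 [] (· ++ [q.2])) PySem.Dict.empty).keys.Nodup := by
    exact PySem.Dict.nodup_keys_foldl_modify_key (pvPairs regixS wLen messages) Prod.fst []
      (fun _ q v => v ++ [q.2]) PySem.Dict.empty (by simp [PySem.Dict.keys_empty])
  rw [pvItems_eq _ hnodup, hkeys]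
  have hmapfst : (pvPairs regixS wLen messages).map Prod.fst
      = (messages.map (pvTag regixS wLen)).flatMap (fun t => t.2) := by
    unfold pvPairs
    rw [List.map_flatMap]
    simp [Function.comp_def, List.map_map]
  have horder : PySem.Set.update ([] : PySem.Set String) ((pvPairs regixS wLen messages).map Prod.fst)
      = (messages.map (pvTag regixS wLen)).foldl (fun ord t =>
          t.2.foldl (fun ord k => if ord.contains k then ord else ord ++ [k]) ord) [] := by
    rw [hmapfst, pvUpdate_flatMap]
    rfl
  rw [horder]
  apply List.map_congr_left
  intro k _
  have hgetD : ((pvPairs regixS wLen messages).foldl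
      (fun d q => d.modify q.1 [] (· ++ [q.2])) PySem.Dict.empty).getD k []
      = ((pvPairs regixS wLen messages).filter (fun q => q.1 == k)).map (·.2) := by
    rw [PySem.Dict.getD_foldl_modify_append]
    rfl
  rw [hgetD]
  exact congrArg _ (pvGather (messages.map (pvTag regixS wLen)) k)

-- ===== VERDICT (by name: the statement is the Claim_ definition above) =====
theorem clsMessagesByRegix_spec : Claim_equal_clsMessagesByRegix := by
  intro regixS wLen messages _
  exact clsMessagesByRegix_eq regixS wLen messages
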